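-- pv_equiv track=rewrite | github.com/MrBrantCode/unitest_baseline | mut_generate/mist_train_taco/taco_12448/solution.py | find_largest_divisible_by_17
-- ===== SOURCE A (Python) =====
-- def find_largest_divisible_by_17(n: str) -> str:
--     def solve(k, n, d):
--         if k == n - 1:
--             num = 0
--             for i in d:
--                 num = num * 10 + i
--             if num % 17 == 0 and num > ans[0]:
--                 ans[0] = num
--             return
--         solve(k + 1, n, d)
--         for i in range(k + 1, n):
--             if d[i] != d[i - 1]:
--                 (d[i], d[k]) = (d[k], d[i])
--                 solve(k + 1, n, d)
--                 (d[i], d[k]) = (d[k], d[i])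
--
--     digits = [ord(c) - ord('0') for c in n]
--     ans = [-1]
--     sz = len(n)
--     solve(0, sz, digits)
--
--     if ans[0] == -1:
--         return 'Not Possible'
--     return str(ans[0])
-- ===== SOURCE B (Python) =====
-- def find_largest_divisible_by_17(n: str) -> str:
--     def best_from(xs, acc):
--         # best final number over arrangements of xs appended after prefix value acc; -1 if none divisible
--         if not xs:
--             return acc if acc % 17 == 0 else -1
--         best = -1
--         for i in range(len(xs)):
--             x = xs[i]
--             if x in xs[:i]:
--                 continue
--             v = best_from(xs[:i] + xs[i + 1:], acc * 10 + x)
--             if v > best: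
--                 best = v
--         return best
--
--     digits = [ord(c) - ord('0') for c in n]
--     best = best_from(digits, 0)
--     if best == -1:
--         return 'Not Possible'
--     return str(best)
-- ===== Notes on version B (the rewrite author's own statement) =====
-- stated objective: alternative
-- what changed: A does in-place swap backtracking over the digit array with a heuristic adjacent-duplicate prune, evaluating the whole array at each leaf into a global mutable maximum; B is a pure recursion that at each level picks each distinct remaining digit once (exact first-occurrence dedup over list slices, no swaps), threads the partial number downward and returns the best divisible completion upward.
import Mathlib
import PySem

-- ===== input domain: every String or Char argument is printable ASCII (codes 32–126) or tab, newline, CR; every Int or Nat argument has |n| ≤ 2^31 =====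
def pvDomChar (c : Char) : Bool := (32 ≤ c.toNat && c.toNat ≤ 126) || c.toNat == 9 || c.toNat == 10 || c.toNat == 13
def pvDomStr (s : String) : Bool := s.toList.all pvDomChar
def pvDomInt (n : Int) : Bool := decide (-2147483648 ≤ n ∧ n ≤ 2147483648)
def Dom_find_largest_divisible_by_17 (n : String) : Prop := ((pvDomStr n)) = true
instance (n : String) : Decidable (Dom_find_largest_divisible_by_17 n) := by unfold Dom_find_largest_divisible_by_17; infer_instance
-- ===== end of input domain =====

-- B replaces A's in-place swap backtracking (with its heuristic adjacent-duplicate prune and a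
-- global running maximum evaluated at full leaves) by a pure recursion that picks each distinct
-- remaining digit once (exact first-occurrence dedup), threads the partial number downwards and
-- returns the best completion upwards; same return value on every non-empty string.

-- ===== PORT A =====
-- num accumulated from a digit list: `for i in d: num = num*10 + i`
def pvNum (d : List Int) : Int := d.foldl (fun a i => a * 10 + i) 0

-- `solve(k, n, d)` with the mutable list d and ans threaded through; fuel = n - k makes the
-- recursion structural (fuel 0 is never reached on the admitted inputs).
def solveA : Nat → Nat → Nat → List Int → Int → List Int × Int
  | 0, _, _, d, ans => (d, ans)
  | fuel+1, k, n, d, ans =>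
    if k = n - 1 then
      let num := pvNum d
      (d, if PySem.Int.mod num 17 = 0 ∧ num > ans then num else ans)
    else
      let st := solveA fuel (k+1) n d ans
      (PySem.List.pyRange ((k : Int)+1) (n : Int) 1).foldl (fun st i =>
        if PySem.List.pyGetD st.1 i 0 ≠ PySem.List.pyGetD st.1 (i-1) 0 then
          let d1 := (st.1.set i.toNat (PySem.List.pyGetD st.1 (k : Int) 0)).set k
                      (PySem.List.pyGetD st.1 i 0)
          let st2 := solveA fuel (k+1) n d1 st.2
          ((st2.1.set i.toNat (PySem.List.pyGetD st2.1 (k : Int) 0)).set k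
             (PySem.List.pyGetD st2.1 i 0), st2.2)
        else st) st

def find_largest_divisible_by_17 (n : String) : String :=
  let digits : List Int := n.toList.map (fun c => (c.toNat : Int) - 48)
  let sz := digits.length       -- sz = len(n)
  let res := solveA sz 0 sz digits (-1)
  if res.2 = -1 then "Not Possible" else PySem.Int.toStr res.2

-- ===== PORT B =====
-- `best_from(xs, acc)`: best final number over arrangements of xs appended after prefix value acc.
-- `xs[:i] + xs[i+1:]` is `xs.take i ++ xs.drop (i+1)`; `.attach` only carries the bound i < len xs
-- needed for termination.
def bestFromF : Nat → List Int → Int → Int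
  | _, [], acc => if PySem.Int.mod acc 17 = 0 then acc else -1
  | 0, _ :: _, _ => -1        -- never reached: fuel = length of the list
  | fuel+1, xs, acc =>
    (List.range xs.length).foldl (fun best i =>
      let x := xs.getD i 0
      if x ∈ xs.take i then best
      else
        let v := bestFromF fuel (xs.take i ++ xs.drop (i+1)) (acc * 10 + x)
        if v > best then v else best) (-1)

def bestFrom (xs : List Int) (acc : Int) : Int := bestFromF xs.length xs acc

def find_largest_divisible_by_17_alt (n : String) : String :=
  let digits : List Int := n.toList.map (fun c => (c.toNat : Int) - 48)
  let best := bestFrom digits 0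
  if best = -1 then "Not Possible" else PySem.Int.toStr best

-- ===== PRECONDITION & SPEC =====
-- A recurses forever (RecursionError) on the empty string; everything else is admitted.
def Pre_find_largest_divisible_by_17 (n : String) : Prop := n ≠ ""
instance (n : String) : Decidable (Pre_find_largest_divisible_by_17 n) := by
  unfold Pre_find_largest_divisible_by_17; infer_instance

def pvWitness_find_largest_divisible_by_17 : String := "17"

def Spec_find_largest_divisible_by_17 (n : String) (out : String) : Prop :=
  out = find_largest_divisible_by_17_alt n
instance (n : String) (out : String) : Decidable (Spec_find_largest_divisible_by_17 n out) := by
  unfold Spec_find_largest_divisible_by_17; infer_instance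

-- ===== CLAIM (what is proved, stated in full; the proofs are below) =====
def Claim_equal_find_largest_divisible_by_17 : Prop := ∀ (n : String), Dom_find_largest_divisible_by_17 n → Pre_find_largest_divisible_by_17 n → Spec_find_largest_divisible_by_17 n (find_largest_divisible_by_17 n)

-- ===== LEMMAS AND PROOFS =====

-- `num % 17 == 0 and num > ans` update step shared by both characterisations
def step17 (a v : Int) : Int := if PySem.Int.mod v 17 = 0 ∧ v > a then v else a

def numFrom (acc : Int) (p : List Int) : Int := p.foldl (fun a i => a * 10 + i) acc

-- the exact tree of digit sequences A's solve() evaluates at its leaves, phrased on the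
-- suffix d[k:]: branch 0 keeps the head, branch m+1 swaps the head with suffix position m+1
-- provided d[k+1+m] != d[k+m]
def leavesS : List Int → List (List Int)
  | [] => []
  | [x] => [[x]]
  | x :: y :: s =>
    ((leavesS (y :: s)).map (fun q => x :: q)) ++
    (List.range (y :: s).length).flatMap (fun m =>
      if (y :: s).getD m 0 ≠ (x :: y :: s).getD m 0 then
        (leavesS ((y :: s).set m x)).map (fun q => (y :: s).getD m 0 :: q)
      else [])
termination_by l => l.length
decreasing_by
  · simp
  · simp

lemma idxOf_le_of_getElem {t : List Int} {y : Int} {j : Nat} (hj : j < t.length)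
    (h : t[j] = y) : t.idxOf y ≤ j := by
  have hy : y ∈ t := h ▸ List.getElem_mem hj
  have hmem : y ∈ t.take (j+1) := by
    subst h
    have hlt : j < (t.take (j+1)).length := by simp; omega
    have hmm := List.getElem_mem hlt
    rwa [List.getElem_take] at hmm
  have := (List.mem_take_iff_idxOf_lt hy).mp hmem
  omega

lemma perm_getElem_cons_eraseIdx (t : List Int) (m : Nat) (hm : m < t.length) :
    t.Perm (t[m] :: t.eraseIdx m) :=
  (PySem.List.perm_cons_eraseIdx t (List.getElem?_eq_getElem hm)).symm

lemma leavesS_sound : ∀ (N : Nat) (s p : List Int), s.length ≤ N → p ∈ leavesS s → p.Perm s := by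
  intro N
  induction N with
  | zero => intro s p hN hp; cases s <;> simp_all [leavesS]
  | succ N ih =>
    intro s p hN hp
    match s with
    | [] => simp [leavesS] at hp
    | [x] => simp [leavesS] at hp; simp [hp]
    | x :: y :: s =>
      rw [leavesS] at hp
      rcases List.mem_append.mp hp with h | h
      · rcases List.mem_map.mp h with ⟨q, hq, rfl⟩
        have := ih (y :: s) q (by simp at hN ⊢; omega) hq
        exact this.cons x
      · rcases List.mem_flatMap.mp h with ⟨m, hm, hbr⟩
        rw [List.mem_range] at hm
        by_cases hcond : (y :: s).getD m 0 ≠ (x :: y :: s).getD m 0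
        · rw [if_pos hcond] at hbr
          rcases List.mem_map.mp hbr with ⟨q, hq, rfl⟩
          have hqp : q.Perm ((y :: s).set m x) :=
            ih _ q (by simp at hN ⊢; omega) hq
          have hset : ((y :: s).set m x).Perm (x :: (y :: s).eraseIdx m) :=
            List.set_perm_cons_eraseIdx hm x
          have hget : (y :: s).getD m 0 = (y :: s)[m] := List.getD_eq_getElem _ _ hm
          rw [hget]
          refine List.Perm.trans (List.Perm.cons _ (hqp.trans hset)) ?_
          refine List.Perm.trans (List.Perm.swap _ _ _) ?_
          exact ((perm_getElem_cons_eraseIdx _ m hm).symm).cons x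
        · rw [if_neg hcond] at hbr
          simp at hbr


lemma leavesS_complete : ∀ (N : Nat) (s p : List Int), s.length ≤ N → s ≠ [] → p.Perm s →
    p ∈ leavesS s := by
  intro N
  induction N with
  | zero => intro s p hN hne; cases s <;> simp_all
  | succ N ih =>
    intro s p hN hne hp
    match s with
    | [x] =>
      rw [List.perm_singleton] at hp
      simp [leavesS, hp]
    | x :: y :: s =>
      match p with
      | [] => exact absurd hp.symm.eq_nil (by simp)
      | z :: q =>
        rw [leavesS]
        by_cases hzx : z = x
        · subst hzx
          have hq : q.Perm (y :: s) := hp.cons_inv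
          refine List.mem_append.mpr (Or.inl ?_)
          exact List.mem_map.mpr ⟨q, ih _ q (by simp at hN ⊢; omega) (by simp) hq, rfl⟩
        · have hz : z ∈ y :: s := by
            have := hp.mem_iff.mp List.mem_cons_self
            simp at this
            rcases this with h | h | h
            · exact absurd h hzx
            · simp [h]
            · simp [h]
          set t : List Int := y :: s with ht
          have hi0lt : t.idxOf z < t.length := List.idxOf_lt_length_of_mem hz
          set m := t.idxOf z with hm
          have hgetz : t[m] = z := List.getElem_idxOf hi0lt
          have hgetD : t.getD m 0 = z := by rw [List.getD_eq_getElem _ _ hi0lt, hgetz]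
          have hcond : t.getD m 0 ≠ (x :: t).getD m 0 := by
            rw [hgetD]
            match hm2 : m with
            | 0 =>
              simp only [List.getD_cons_zero]
              exact hzx
            | m'+1 =>
              have hm'lt : m' < t.length := by omega
              rw [List.getD_cons_succ, List.getD_eq_getElem _ _ hm'lt]
              intro hh
              have := idxOf_le_of_getElem hm'lt hh.symm
              omega
          have hE : t.Perm (z :: t.eraseIdx m) := by
            have := perm_getElem_cons_eraseIdx t m hi0lt
            rwa [hgetz] at this
          have hq : q.Perm (t.set m x) := by
            have h1 : (z :: q).Perm (z :: x :: t.eraseIdx m) :=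
              hp.trans ((hE.cons x).trans (List.Perm.swap z x _))
            exact h1.cons_inv.trans (List.set_perm_cons_eraseIdx hi0lt x).symm
          refine List.mem_append.mpr (Or.inr ?_)
          refine List.mem_flatMap.mpr ⟨m, List.mem_range.mpr hi0lt, ?_⟩
          rw [if_pos hcond]
          refine List.mem_map.mpr ⟨q, ?_, by rw [hgetD]⟩
          refine ih _ q ?_ ?_ hq
          · simp at hN ⊢; omega
          · intro hnil
            have := congrArg List.length hnil
            simp at this

def loopBody (f k n : Nat) (st : List Int × Int) (i : Int) : List Int × Int :=
  if PySem.List.pyGetD st.1 i 0 ≠ PySem.List.pyGetD st.1 (i-1) 0 then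
    let d1 := (st.1.set i.toNat (PySem.List.pyGetD st.1 (k : Int) 0)).set k
                (PySem.List.pyGetD st.1 i 0)
    let st2 := solveA f (k+1) n d1 st.2
    ((st2.1.set i.toNat (PySem.List.pyGetD st2.1 (k : Int) 0)).set k
       (PySem.List.pyGetD st2.1 i 0), st2.2)
  else st

lemma solveA_else (f k n : Nat) (d : List Int) (ans : Int) (h : ¬ k = n - 1) :
    solveA (f+1) k n d ans
      = (PySem.List.pyRange ((k : Int)+1) (n : Int) 1).foldl (loopBody f k n)
          (solveA f (k+1) n d ans) := by
  rw [solveA, if_neg h]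
  rfl

lemma solveA_leaf (f k n : Nat) (d : List Int) (ans : Int) (h : k = n - 1) :
    solveA (f+1) k n d ans = (d, step17 ans (pvNum d)) := by
  rw [solveA, if_pos h]
  unfold step17
  rfl

def branchL (x : Int) (t : List Int) (m : Nat) : List (List Int) :=
  if t.getD m 0 ≠ (x :: t).getD m 0 then
    (leavesS (t.set m x)).map (fun q => t.getD m 0 :: q)
  else []

lemma leavesS_cons_cons (x y : Int) (s : List Int) :
    leavesS (x :: y :: s)
      = ((leavesS (y :: s)).map (fun q => x :: q)) ++
        (List.range (y :: s).length).flatMap (branchL x (y :: s)) := by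
  rw [leavesS]
  rfl

lemma getD_drop (l : List Int) (j m : Nat) : (l.drop j).getD m 0 = l.getD (j + m) 0 := by
  simp [List.getD_eq_getElem?_getD, List.getElem?_drop]

lemma take_succ_in (d : List Int) (k : Nat) (h : k < d.length) :
    d.take (k+1) = d.take k ++ [d[k]] := by
  rw [List.take_succ, List.getElem?_eq_getElem h]
  rfl

lemma set_swap_swap (d : List Int) (i k : Nat) (hik : i ≠ k) (hi : i < d.length)
    (hk : k < d.length) :
    let d1 := (d.set i d[k]).set k d[i]
    (d1.set i (d1.getD k 0)).set k (d1.getD i 0) = d := by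
  intro d1
  have h1 : d1.getD k 0 = d[i] := by
    rw [List.getD_eq_getElem _ _ (by simp [d1]; omega)]
    simp [d1, List.getElem_set]
  have h2 : d1.getD i 0 = d[k] := by
    rw [List.getD_eq_getElem _ _ (by simp [d1]; omega)]
    simp [d1, List.getElem_set, hik, Ne.symm hik]
  rw [h1, h2]
  show (((d.set i d[k]).set k d[i]).set i d[i]).set k d[k] = d
  have e1 : ((d.set i d[k]).set k d[i]).set i d[i]
      = ((d.set i d[k]).set i d[i]).set k d[i] := List.set_comm _ _ (Ne.symm hik)
  rw [e1, List.set_set, List.set_set, List.set_getElem_self hi, List.set_getElem_self hk]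

lemma take_succ_set (l : List Int) (k : Nat) (v : Int) (hk : k < l.length) :
    (l.set k v).take (k+1) = l.take k ++ [v] := by
  rw [take_succ_in _ _ (by simp [hk])]
  rw [List.take_set_of_le le_rfl, List.getElem_set_self]

lemma loopA (f k n : Nat) (d : List Int) (hd : d.length = n) (hkn : k + 2 ≤ n)
    (IH : ∀ (d' : List Int) (ans' : Int), d'.length = n →
      solveA f (k+1) n d' ans'
        = (d', ((leavesS (d'.drop (k+1))).map (fun q => pvNum (d'.take (k+1) ++ q))).foldl
            step17 ans')) :
    ∀ (cnt : Nat), cnt ≤ n - (k+1) → ∀ (a : Int),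
      (PySem.List.pyRange ((n - cnt : Nat) : Int) (n : Int) 1).foldl (loopBody f k n) (d, a)
        = (d, (((List.range' (n - (k+1) - cnt) cnt).flatMap
                (branchL (d.getD k 0) (d.drop (k+1)))).map
              (fun q => pvNum (d.take k ++ q))).foldl step17 a) := by
  intro cnt
  induction cnt with
  | zero =>
    intro _ a
    rw [Nat.sub_zero, PySem.List.pyRange_one_eq_nil le_rfl]
    simp
  | succ cnt ihc =>
    intro hcnt a
    set i := n - (cnt+1) with hi
    set m := n - (k+1) - (cnt+1) with hm
    have hik1 : k + 1 ≤ i := by omega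
    have hin : i < n := by omega
    have him : i = k + 1 + m := by omega
    have h1 : PySem.List.pyRange ((i : Nat) : Int) (n : Int) 1
        = ((i : Nat) : Int) :: PySem.List.pyRange (((i : Nat) : Int) + 1) (n : Int) 1 :=
      PySem.List.pyRange_one_cons (by omega)
    have h2 : ((i : Nat) : Int) + 1 = ((n - cnt : Nat) : Int) := by omega
    rw [h1, h2, List.foldl_cons]
    -- getD forms of the two compared entries
    have hgi : PySem.List.pyGetD d ((i : Nat) : Int) 0 = d.getD i 0 :=
      PySem.List.pyGetD_natCast ..
    have hgi1 : PySem.List.pyGetD d (((i : Nat) : Int) - 1) 0 = d.getD (i-1) 0 := by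
      have : ((i : Nat) : Int) - 1 = ((i - 1 : Nat) : Int) := by omega
      rw [this, PySem.List.pyGetD_natCast]
    -- branch condition alignment
    have e1 : (d.drop (k+1)).getD m 0 = d.getD i 0 := by
      rw [getD_drop, ← him]
    have e2 : ((d.getD k 0) :: d.drop (k+1)).getD m 0 = d.getD (i-1) 0 := by
      match m, him with
      | 0, him => rw [List.getD_cons_zero]; congr 1; omega
      | m'+1, him =>
        rw [List.getD_cons_succ, getD_drop]
        congr 1; omega
    have hrange : List.range' (n - (k+1) - (cnt+1)) (cnt+1)
        = m :: List.range' (n - (k+1) - cnt) cnt := by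
      have heq : n - (k+1) - (cnt+1) + 1 = n - (k+1) - cnt := by omega
      rw [← hm, List.range'_succ, heq]
    by_cases hC : d.getD i 0 ≠ d.getD (i-1) 0
    · -- swap branch
      have hgk : PySem.List.pyGetD d ((k : Nat) : Int) 0 = d.getD k 0 :=
        PySem.List.pyGetD_natCast ..
      have hdk : d.getD k 0 = d[k]'(by omega) := List.getD_eq_getElem _ _ (by omega)
      have hdi : d.getD i 0 = d[i]'(by omega) := List.getD_eq_getElem _ _ (by omega)
      have hbody : loopBody f k n (d, a) ((i : Nat) : Int)
          = (d, ((leavesS ((d.drop (k+1)).set m (d[k]'(by omega)))).map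
                (fun q => pvNum (d.take k ++ (d[i]'(by omega) :: q)))).foldl step17 a) := by
        unfold loopBody
        rw [if_pos (by simpa [hgi, hgi1] using hC)]
        simp only [hgi, hgk, Int.toNat_natCast]
        set d1 : List Int := (d.set i (d.getD k 0)).set k (d.getD i 0) with hd1
        have hd1len : d1.length = n := by simp [hd1, hd]
        rw [IH d1 a hd1len]
        have f1 : d1.take (k+1) = d.take k ++ [d[i]'(by omega)] := by
          rw [hd1, ← hdi, take_succ_set _ _ _ (by simp; omega), List.take_set_of_le (by omega)]
        have f2 : d1.drop (k+1) = (d.drop (k+1)).set m (d[k]'(by omega)) := by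
          rw [hd1, ← hdk]
          rw [List.drop_set, if_pos (by omega), List.drop_set, if_neg (by omega)]
          congr 1
          omega
        -- swap back restores d
        have hswap := set_swap_swap d i k (by omega) (by omega) (by omega)
        refine Prod.ext ?_ ?_
        · show (d1.set i (PySem.List.pyGetD d1 ((k:Nat):Int) 0)).set k
              (PySem.List.pyGetD d1 ((i:Nat):Int) 0) = d
          rw [PySem.List.pyGetD_natCast, PySem.List.pyGetD_natCast]
          rw [hd1, hdk, hdi] at *
          exact hswap
        · show (((leavesS (d1.drop (k+1))).map (fun q => pvNum (d1.take (k+1) ++ q))).foldl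
              step17 a) = _
          rw [f1, f2]
          congr 1
          apply List.map_congr_left
          intro q hq
          rw [List.append_assoc]
          rfl
      rw [hbody]
      have hA : ((branchL (d.getD k 0) (d.drop (k+1)) m).map
            (fun q => pvNum (d.take k ++ q))).foldl step17 a
          = ((leavesS ((d.drop (k+1)).set m (d[k]'(by omega)))).map
              (fun q => pvNum (d.take k ++ (d[i]'(by omega) :: q)))).foldl step17 a := by
        unfold branchL
        rw [if_pos (by rw [e1, e2]; exact hC), hdk, List.map_map]
        congr 1
        apply List.map_congr_left
        intro q hq
        simp only [Function.comp]
        rw [e1, hdi]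
      rw [hrange, List.flatMap_cons, List.map_append, List.foldl_append, hA]
      exact ihc (by omega) _
    · -- skip branch
      have hbody : loopBody f k n (d, a) ((i : Nat) : Int) = (d, a) := by
        unfold loopBody
        rw [if_neg (by simpa [hgi, hgi1] using hC)]
      have hB : branchL (d.getD k 0) (d.drop (k+1)) m = [] := by
        unfold branchL
        rw [if_neg (by rw [e1, e2]; simpa using hC)]
      rw [hbody, hrange, List.flatMap_cons, hB, List.nil_append]
      exact ihc (by omega) a

lemma solveA_spec : ∀ (fuel k n : Nat) (d : List Int) (ans : Int),
    d.length = n → k < n → fuel = n - k →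
    solveA fuel k n d ans
      = (d, ((leavesS (d.drop k)).map (fun q => pvNum (d.take k ++ q))).foldl step17 ans) := by
  intro fuel
  induction fuel with
  | zero => intro k n d ans hd hk hf; omega
  | succ f ih =>
    intro k n d ans hd hk hf
    by_cases hleaf : k = n - 1
    · rw [solveA_leaf _ _ _ _ _ hleaf]
      have hdrop : d.drop k = [d[k]'(by omega)] := by
        rw [List.drop_eq_getElem_cons (by omega)]
        congr 1
        apply List.drop_eq_nil_of_le
        omega
      have htake : d.take k ++ [d[k]'(by omega)] = d := by
        rw [← take_succ_in d k (by omega)]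
        apply List.take_of_length_le
        omega
      rw [hdrop]
      simp only [leavesS, List.map_cons, List.map_nil, List.foldl_cons, List.foldl_nil]
      rw [htake]
    · have hk2 : k + 2 ≤ n := by omega
      have IH : ∀ (d' : List Int) (ans' : Int), d'.length = n →
          solveA f (k+1) n d' ans'
            = (d', ((leavesS (d'.drop (k+1))).map
                (fun q => pvNum (d'.take (k+1) ++ q))).foldl step17 ans') := by
        intro d' ans' hd'
        exact ih (k+1) n d' ans' hd' (by omega) (by omega)
      rw [solveA_else _ _ _ _ _ hleaf, IH d ans hd]
      set cnt0 := n - (k+1) with hcnt0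
      have hcast : ((k : Int)) + 1 = ((n - cnt0 : Nat) : Int) := by omega
      rw [hcast]
      rw [loopA f k n d hd hk2 IH cnt0 le_rfl _]
      have hdkk : d.getD k 0 = d[k]'(by omega) := List.getD_eq_getElem _ _ (by omega)
      rw [hdkk]
      -- now assemble the leavesS unfolding on the RHS
      have hd0 : d.drop k = d[k]'(by omega) :: d.drop (k+1) := List.drop_eq_getElem_cons (by omega)
      have hd1 : d.drop (k+1) = d[k+1]'(by omega) :: d.drop (k+2) := by
        have := List.drop_eq_getElem_cons (l := d) (i := k+1) (by omega)
        simpa using this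
      have hlen1 : (d.drop (k+1)).length = cnt0 := by simp [hd, hcnt0]
      have hunf : leavesS (d.drop k)
          = ((leavesS (d.drop (k+1))).map (fun q => d[k]'(by omega) :: q)) ++
            (List.range cnt0).flatMap (branchL (d[k]'(by omega)) (d.drop (k+1))) := by
        rw [hd0, hd1, leavesS_cons_cons, ← hd1]
        rw [hlen1]
      rw [hunf, List.map_append, List.foldl_append]
      have hpart1 : ((leavesS (d.drop (k+1))).map (fun q => d[k]'(by omega) :: q)).map
            (fun q => pvNum (d.take k ++ q))
          = (leavesS (d.drop (k+1))).map (fun q => pvNum (d.take (k+1) ++ q)) := by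
        rw [List.map_map]
        apply List.map_congr_left
        intro q hq
        simp only [Function.comp]
        rw [take_succ_in d k (by omega), List.append_assoc]
        rfl
      rw [hpart1]
      rw [Nat.sub_self, List.range_eq_range']


lemma step17_ge (a v : Int) : a ≤ step17 a v := by
  unfold step17; split_ifs with h
  · omega
  · omega

lemma le_foldl_step17 (vs : List Int) (a : Int) : a ≤ vs.foldl step17 a := by
  induction vs generalizing a with
  | nil => simp
  | cons v vs ih => exact le_trans (step17_ge a v) (ih _)

lemma mem_le_foldl_step17 (vs : List Int) (a v : Int) (hv : v ∈ vs)
    (hdiv : PySem.Int.mod v 17 = 0) : v ≤ vs.foldl step17 a := by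
  induction vs generalizing a with
  | nil => simp at hv
  | cons w ws ih =>
    rcases List.mem_cons.mp hv with h | h
    · subst h
      refine le_trans ?_ (le_foldl_step17 ws (step17 a v))
      unfold step17; split_ifs with h2
      · omega
      · have : ¬ v > a := fun hgt => h2 ⟨hdiv, hgt⟩
        omega
    · exact ih _ h

lemma foldl_step17_cases (vs : List Int) (a : Int) :
    vs.foldl step17 a = a ∨
      ∃ v ∈ vs, PySem.Int.mod v 17 = 0 ∧ vs.foldl step17 a = v := by
  induction vs generalizing a with
  | nil => left; rfl
  | cons w ws ih =>
    simp only [List.foldl_cons]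
    rcases ih (step17 a w) with h | ⟨v, hv, hd, he⟩
    · rw [h]; unfold step17; split_ifs with h2
      · exact Or.inr ⟨w, List.mem_cons_self, h2.1, rfl⟩
      · exact Or.inl rfl
    · exact Or.inr ⟨v, List.mem_cons_of_mem _ hv, hd, he⟩

lemma sel_ge (g : Int → Nat → Int) (hg : ∀ b i, b ≤ g b i) :
    ∀ (L : List Nat) (b : Int), b ≤ L.foldl g b := by
  intro L
  induction L with
  | nil => simp
  | cons i L ih => intro b; exact le_trans (hg b i) (ih _)

lemma sel_cases (g : Int → Nat → Int) (P : Nat → Prop) (v : Nat → Int)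
    (hg : ∀ b i, g b i = b ∨ (P i ∧ g b i = v i)) :
    ∀ (L : List Nat) (b : Int),
      L.foldl g b = b ∨ ∃ i ∈ L, P i ∧ L.foldl g b = v i := by
  intro L
  induction L with
  | nil => intro b; left; rfl
  | cons i L ih =>
    intro b
    simp only [List.foldl_cons]
    rcases ih (g b i) with h | ⟨j, hj, hP, he⟩
    · rw [h]
      rcases hg b i with h2 | ⟨hP, h2⟩
      · left; exact h2
      · exact Or.inr ⟨i, List.mem_cons_self, hP, h2⟩
    · exact Or.inr ⟨j, List.mem_cons_of_mem _ hj, hP, he⟩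

lemma sel_le (g : Int → Nat → Int) (P : Nat → Prop) (v : Nat → Int)
    (hmono : ∀ b i, b ≤ g b i) (hsel : ∀ b i, P i → v i ≤ g b i) :
    ∀ (L : List Nat) (b : Int) (i : Nat), i ∈ L → P i → v i ≤ L.foldl g b := by
  intro L
  induction L with
  | nil => intro b i h; simp at h
  | cons j L ih =>
    intro b i hm hP
    simp only [List.foldl_cons]
    rcases List.mem_cons.mp hm with h | h
    · subst h; exact le_trans (hsel b i hP) (sel_ge g hmono L _)
    · exact ih _ i h hP

lemma bestFromF_succ (f : Nat) (z : Int) (zs : List Int) (acc : Int) :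
    bestFromF (f+1) (z :: zs) acc =
      (List.range (z :: zs).length).foldl (fun best i =>
        if ((z :: zs).getD i 0 ∈ (z :: zs).take i : Prop) then best
        else if bestFromF f ((z :: zs).take i ++ (z :: zs).drop (i+1))
                  (acc * 10 + (z :: zs).getD i 0) > best
          then bestFromF f ((z :: zs).take i ++ (z :: zs).drop (i+1))
                  (acc * 10 + (z :: zs).getD i 0)
          else best) (-1) := rfl

lemma eraseIdx_eq (xs : List Int) (i : Nat) : xs.take i ++ xs.drop (i+1) = xs.eraseIdx i := by
  rw [List.eraseIdx_eq_take_drop_succ]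

lemma bestFromF_ge : ∀ (fuel : Nat) (xs : List Int) (acc : Int), xs ≠ [] →
    -1 ≤ bestFromF fuel xs acc := by
  intro fuel xs acc h
  match fuel, xs with
  | _, [] => exact absurd rfl h
  | 0, _ :: _ => simp [bestFromF]
  | fuel+1, x :: xs =>
    rw [bestFromF_succ]
    refine sel_ge _ ?_ _ _
    intro b i
    dsimp only
    split_ifs <;> omega

lemma bestFromF_cases : ∀ (fuel : Nat) (xs : List Int) (acc : Int),
    fuel = xs.length → xs ≠ [] →
    bestFromF fuel xs acc = -1 ∨
      ∃ p, p.Perm xs ∧ numFrom acc p = bestFromF fuel xs acc ∧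
        PySem.Int.mod (bestFromF fuel xs acc) 17 = 0 := by
  intro fuel
  induction fuel with
  | zero => intro xs acc hf hne; cases xs <;> simp_all
  | succ f ih =>
    intro xs acc hf hne
    match xs, hne with
    | z :: zs, _ =>
    rw [bestFromF_succ]
    rcases sel_cases
      (fun best i =>
        if ((z :: zs).getD i 0 ∈ (z :: zs).take i : Prop) then best
        else if bestFromF f ((z :: zs).take i ++ (z :: zs).drop (i+1))
                  (acc * 10 + (z :: zs).getD i 0) > best
          then bestFromF f ((z :: zs).take i ++ (z :: zs).drop (i+1))
                  (acc * 10 + (z :: zs).getD i 0)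
          else best)
      (fun _ => True)
      (fun i => bestFromF f ((z :: zs).take i ++ (z :: zs).drop (i+1))
                  (acc * 10 + (z :: zs).getD i 0))
      (by intro b i
          dsimp only
          split_ifs with h1 h2
          · left; rfl
          · exact Or.inr ⟨trivial, rfl⟩
          · left; rfl)
      (List.range (z :: zs).length) (-1) with h | ⟨i, hi, -, he⟩
    · exact Or.inl h
    · rw [List.mem_range] at hi
      rw [he, eraseIdx_eq]
      have hget : (z :: zs).getD i 0 = (z :: zs)[i] := List.getD_eq_getElem _ _ hi
      set x := (z :: zs).getD i 0 with hx
      have hperm : (x :: (z :: zs).eraseIdx i).Perm (z :: zs) := by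
        refine PySem.List.perm_cons_eraseIdx _ ?_
        rw [List.getElem?_eq_getElem hi, hget]
      have hlen : ((z :: zs).eraseIdx i).length = f := by
        rw [List.length_eraseIdx_of_lt hi]
        simp only [List.length_cons] at hf ⊢
        omega
      by_cases hz : (z :: zs).eraseIdx i = []
      · rw [hz]
        simp only [bestFromF]
        split_ifs with hdiv
        · right
          refine ⟨[x], by simpa [hz] using hperm, by simp [numFrom], hdiv⟩
        · left; rfl
      · rcases ih ((z :: zs).eraseIdx i) (acc * 10 + x) hlen.symm hz with h2 | ⟨p, hp, hnum, hdiv⟩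
        · left; exact h2
        · right
          refine ⟨x :: p, (hp.cons x).trans hperm, ?_, hdiv⟩
          simpa [numFrom] using hnum

lemma bestFromF_nil : ∀ (fuel : Nat) (acc : Int),
    bestFromF fuel [] acc = if PySem.Int.mod acc 17 = 0 then acc else -1 := by
  intro fuel acc; cases fuel <;> rfl

lemma bestFromF_le : ∀ (fuel : Nat) (xs : List Int) (acc : Int),
    fuel = xs.length → xs ≠ [] →
    ∀ p, p.Perm xs → PySem.Int.mod (numFrom acc p) 17 = 0 →
      numFrom acc p ≤ bestFromF fuel xs acc := by
  intro fuel
  induction fuel with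
  | zero => intro xs acc hf hne; cases xs <;> simp_all
  | succ f ih =>
    intro xs acc hf hne p hp hdiv
    match xs, hne with
    | z :: zs, _ =>
    cases p with
    | nil => exact absurd hp.symm.eq_nil (by simp)
    | cons y q =>
    have hy : y ∈ z :: zs := hp.mem_iff.mp List.mem_cons_self
    have hi0lt : (z :: zs).idxOf y < (z :: zs).length := List.idxOf_lt_length_of_mem hy
    set i0 := (z :: zs).idxOf y with hi0
    have hgety : (z :: zs)[i0] = y := List.getElem_idxOf hi0lt
    have hgetD : (z :: zs).getD i0 0 = y := by
      rw [List.getD_eq_getElem _ _ hi0lt, hgety]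
    have hskip : ¬ ((z :: zs).getD i0 0 ∈ (z :: zs).take i0) := by
      rw [hgetD]
      intro hmem
      have := (List.mem_take_iff_idxOf_lt hy).mp hmem
      omega
    have hqperm : q.Perm ((z :: zs).eraseIdx i0) := by
      have h1 : q = (y :: q).erase y := (List.erase_cons_head y q).symm
      rw [h1, ← List.erase_eq_eraseIdx_of_idxOf (l := z :: zs) (a := y) rfl]
      exact hp.erase y
    have hnum : numFrom acc (y :: q) = numFrom (acc * 10 + y) q := by
      simp [numFrom]
    have hlen : ((z :: zs).eraseIdx i0).length = f := by
      rw [List.length_eraseIdx_of_lt hi0lt]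
      simp only [List.length_cons] at hf ⊢
      omega
    have hbranch : numFrom acc (y :: q) ≤
        bestFromF f ((z :: zs).take i0 ++ (z :: zs).drop (i0+1)) (acc * 10 + (z :: zs).getD i0 0) := by
      rw [eraseIdx_eq, hgetD]
      by_cases hz : (z :: zs).eraseIdx i0 = []
      · have hq : q = [] := by
          have := hqperm.length_eq
          rw [hz] at this; simpa using this
        subst hq
        rw [hz, bestFromF_nil]
        simp only [numFrom, List.foldl_cons, List.foldl_nil] at hdiv ⊢
        rw [if_pos hdiv]
      · rw [hnum] at hdiv ⊢
        exact ih _ _ hlen.symm hz q hqperm hdiv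
    rw [bestFromF_succ]
    refine le_trans hbranch
      (sel_le
        (fun best i =>
          if ((z :: zs).getD i 0 ∈ (z :: zs).take i : Prop) then best
          else if bestFromF f ((z :: zs).take i ++ (z :: zs).drop (i+1))
                    (acc * 10 + (z :: zs).getD i 0) > best
            then bestFromF f ((z :: zs).take i ++ (z :: zs).drop (i+1))
                    (acc * 10 + (z :: zs).getD i 0)
            else best)
        (fun i => ¬ ((z :: zs).getD i 0 ∈ (z :: zs).take i))
        (fun i => bestFromF f ((z :: zs).take i ++ (z :: zs).drop (i+1))
                    (acc * 10 + (z :: zs).getD i 0))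
        ?_ ?_ (List.range (z :: zs).length) (-1) i0 (List.mem_range.mpr hi0lt) hskip)
    · intro b i
      dsimp only
      split_ifs <;> omega
    · intro b i hP
      dsimp only
      rw [if_neg hP]
      split_ifs <;> omega


lemma main_eq (ds : List Int) (hne : ds ≠ []) :
    ((leavesS ds).map pvNum).foldl step17 (-1) = bestFromF ds.length ds 0 := by
  have hnum : ∀ p : List Int, numFrom 0 p = pvNum p := fun p => rfl
  apply le_antisymm
  · rcases foldl_step17_cases ((leavesS ds).map pvNum) (-1) with h | ⟨v, hv, hdiv, he⟩
    · rw [h]; exact bestFromF_ge _ _ _ hne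
    · rw [he]
      rcases List.mem_map.mp hv with ⟨q, hq, rfl⟩
      have := bestFromF_le ds.length ds 0 rfl hne q
        (leavesS_sound ds.length ds q le_rfl hq) (by rw [hnum]; exact hdiv)
      rwa [hnum] at this
  · rcases bestFromF_cases ds.length ds 0 rfl hne with h | ⟨p, hp, hnum2, hdiv⟩
    · rw [h]; exact le_foldl_step17 _ _
    · rw [← hnum2, hnum]
      refine mem_le_foldl_step17 _ _ _ ?_ ?_
      · exact List.mem_map.mpr ⟨p, leavesS_complete ds.length ds p le_rfl hne hp, rfl⟩
      · rw [← hnum p] at *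
        rw [hnum2]
        exact hdiv

-- ===== VERDICT (by name: the statement is the Claim_ definition above) =====
theorem find_largest_divisible_by_17_spec : Claim_equal_find_largest_divisible_by_17 := by
  intro n _ hpre
  unfold Spec_find_largest_divisible_by_17
  unfold find_largest_divisible_by_17 find_largest_divisible_by_17_alt bestFrom
  dsimp only
  have hne : n.toList.map (fun c => ((c.toNat : Int) - 48)) ≠ [] := by
    intro h
    exact hpre (String.toList_eq_nil_iff.mp (by simpa using h))
  have hlen : 0 < (n.toList.map (fun c => ((c.toNat : Int) - 48))).length :=
    List.length_pos_iff.mpr hne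
  rw [solveA_spec _ 0 _ _ (-1) rfl hlen (by omega)]
  simp only [List.drop_zero, List.take_zero, List.nil_append]
  rw [main_eq _ hne]
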